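-- pv_equiv track=rewrite | github.com/Dochoau93/teoria-de-la-compilacion | resplit.py | resplit
-- ===== SOURCE A (Python) =====
-- dfa = []
--
-- accept_states = []
--
-- def addch(state, c):
--     next_state = len(dfa)
--     dfa.append(dict())
--     dfa[state][c] = next_state
--     return next_state
--
-- def addch_star(state, c):
--     dfa[state][c] = state
--     return state
--
-- def do_dfa(re, text):
--     pos = 0
--     state = 0
--     while pos < len(re):
--         if pos+1 < len(re) and re[pos+1] == '*':
--             state = addch_star(state, re[pos])
--             pos += 1
--         else:
--             state = addch(state, re[pos])
--         pos += 1
--     accept_states.append(state)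
--     return
--
-- def sim_dfa(text):
--     state = 0
--     pos = 0
--     text_len = 0
--     while pos < len(text) and state != -1:
--         d = dfa[state]
--         ch = text[pos]
--         if ch in d.keys():
--             state = d[ch]
--             if state in accept_states:
--                 text_len = pos+1
--             pos += 1
--         elif '.' in d.keys():
--             state = d['.']
--             if state in accept_states:
--                 text_len = pos+1
--             pos += 1
--         else:
--             state = -1
--     return text_len
--
-- def resplit(re, text, sep = '/'):
--     del dfa[:]
--     del accept_states[:]
--     dfa.append(dict())
--     do_dfa(re, text)
--     m = 0
--     n = 0
--     result = ''
--     while m < len(text):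
--         n = sim_dfa(text[m:])
--         if n == 0:
--             return 'FAIL'
--         if m != 0:
--             result += sep
--         result += text[m:m+n]
--         m += n
--     return result
-- ===== SOURCE B (Python) =====
-- def resplit(re, text, sep='/'):
--     # Different algorithm: instead of building an explicit DFA and stepping it
--     # character by character, split the pattern into items (starred-prefix,
--     # advancing char) plus trailing stars, and match each item by skipping a
--     # maximal run of "stay" characters and then consuming the advancing char;
--     # matching works on absolute indices, no text[m:] slice is ever made.
--     items = []
--     stars = []
--     i = 0
--     while i < len(re):
--         if i + 1 < len(re) and re[i + 1] == '*':
--             stars.append(re[i])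
--             i += 2
--         else:
--             items.append((stars, re[i]))
--             stars = []
--             i += 1
--     tail = stars
--     n = len(text)
--     tail_dot = '.' in tail
--
--     def longest(start):
--         # length of the longest token starting at text[start] (0 = no token)
--         pos = start
--         for st, adv in items:
--             dot_stay = adv != '.' and '.' in st
--             while pos < n and text[pos] != adv and (text[pos] in st or dot_stay):
--                 pos += 1
--             if pos < n and (text[pos] == adv or adv == '.'):
--                 pos += 1
--             else:
--                 return 0
--         while pos < n and (text[pos] in tail or tail_dot):
--             pos += 1
--         return pos - start
--
--     parts = []
--     m = 0
--     while m < n: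
--         k = longest(m)
--         if k == 0:
--             return 'FAIL'
--         parts.append(text[m:m + k])
--         m += k
--     return sep.join(parts)
-- ===== Notes on version B (the rewrite author's own statement) =====
-- stated objective: alternative
-- what changed: B never builds a transition-table DFA nor steps it char by char: it splits the pattern into (starred-chars, advancing-char) items plus trailing stars and matches each item by skipping a maximal run of stay characters and consuming one advancing char, on absolute indices (no text[m:] slicing), joining the collected parts once.
import Mathlib
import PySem

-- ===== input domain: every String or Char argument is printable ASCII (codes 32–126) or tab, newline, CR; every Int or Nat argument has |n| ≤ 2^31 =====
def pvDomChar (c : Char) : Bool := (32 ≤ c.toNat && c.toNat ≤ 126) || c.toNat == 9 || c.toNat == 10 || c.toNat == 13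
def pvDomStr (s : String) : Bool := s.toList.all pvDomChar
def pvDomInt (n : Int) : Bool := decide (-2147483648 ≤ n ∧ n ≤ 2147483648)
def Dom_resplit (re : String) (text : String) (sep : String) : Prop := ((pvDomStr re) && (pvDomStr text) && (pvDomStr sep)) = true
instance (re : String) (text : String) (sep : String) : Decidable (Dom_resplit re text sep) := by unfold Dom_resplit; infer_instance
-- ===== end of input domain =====

-- B does not build a transition-table DFA: it splits the pattern into
-- (starred-chars, advancing-char) items plus trailing stars and matches each
-- item by skipping a maximal run of stay characters then consuming one
-- advancing char, on absolute indices; equivalence of the return values is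
-- proved for all inputs.

-- ===== PORT A =====
-- A's module-level mutable `dfa` / `accept_states` are threaded explicitly; the
-- nonnegative slices text[m:], text[m:m+n] are List.drop/take, dfa[state] is List.getD
-- (state is always in range in A), states are the Nat indices A uses.
def addchA (dfa : List (PySem.Dict Char Nat)) (state : Nat) (c : Char) :
    List (PySem.Dict Char Nat) × Nat :=
  let next := dfa.length
  let dfa2 := dfa ++ [PySem.Dict.empty]
  (dfa2.set state ((dfa2.getD state PySem.Dict.empty).insert c next), next)

def addchStarA (dfa : List (PySem.Dict Char Nat)) (state : Nat) (c : Char) :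
    List (PySem.Dict Char Nat) × Nat :=
  (dfa.set state ((dfa.getD state PySem.Dict.empty).insert c state), state)

-- do_dfa's while loop ("if pos+1 < len(re) and re[pos+1] == '*'") on the remaining pattern
def doDfaA (tokens : List Char) (dfa : List (PySem.Dict Char Nat)) (state : Nat) :
    List (PySem.Dict Char Nat) × Nat :=
  match tokens with
  | [] => (dfa, state)
  | c :: rest =>
    if rest.head? = some '*' then
      let p := addchStarA dfa state c
      doDfaA rest.tail p.1 p.2
    else
      let p := addchA dfa state c
      doDfaA rest p.1 p.2
termination_by tokens.length
decreasing_by all_goals (simp [List.length_tail]; try omega)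

-- sim_dfa's while loop; the 'state = -1' branch just exits the loop, so it returns text_len
def simA (dfa : List (PySem.Dict Char Nat)) (accepts : List Nat) :
    List Char → Nat → Nat → Nat → Nat
  | [], _, _, textLen => textLen
  | ch :: rest, state, pos, textLen =>
    let d := dfa.getD state PySem.Dict.empty
    match d.get? ch with
    | some s => simA dfa accepts rest s (pos + 1) (if s ∈ accepts then pos + 1 else textLen)
    | none =>
      match d.get? '.' with
      | some s => simA dfa accepts rest s (pos + 1) (if s ∈ accepts then pos + 1 else textLen)
      | none => textLen

-- resplit's while loop over m, on the remaining suffix text[m:]; notFirst = (m != 0)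
def resLoopA (dfa : List (PySem.Dict Char Nat)) (accepts : List Nat) (sep : List Char)
    (rem : List Char) (notFirst : Bool) (result : List Char) : List Char :=
  match rem with
  | [] => result
  | ch :: rest =>
    let n := simA dfa accepts (ch :: rest) 0 0 0
    if _h : n = 0 then "FAIL".toList
    else resLoopA dfa accepts sep ((ch :: rest).drop n) true
        (result ++ (if notFirst then sep else []) ++ (ch :: rest).take n)
termination_by rem.length
decreasing_by simp; omega

def resplit (re : String) (text : String) (sep : String) : String :=
  let p := doDfaA re.toList [PySem.Dict.empty] 0
  String.ofList (resLoopA p.1 [p.2] sep.toList text.toList false [])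

-- ===== PORT B =====
-- compile loop of Source B: items (stars, advancing char) plus trailing stars
def compileB (tokens : List Char) (stars : List Char) :
    List (List Char × Char) × List Char :=
  match tokens with
  | [] => ([], stars)
  | c :: rest =>
    if rest.head? = some '*' then compileB rest.tail (stars ++ [c])
    else
      let p := compileB rest []
      ((stars, c) :: p.1, p.2)
termination_by tokens.length
decreasing_by all_goals (simp [List.length_tail]; try omega)

-- Source B's inner 'while … pos += 1' run-skipper: (#chars consumed, what is left)
def skipRun (p : Char → Bool) : List Char → Nat × List Char
  | [] => (0, [])
  | ch :: rest =>
    if p ch then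
      let q := skipRun p rest
      (q.1 + 1, q.2)
    else (0, ch :: rest)

-- the 'for st, adv in items' loop of longest(): per item skip a stay-run, then
-- consume the advancing char; none = the 'return 0' path
def matchItems : List (List Char × Char) → List Char → Option (Nat × List Char)
  | [], rem => some (0, rem)
  | (st, adv) :: its, rem =>
    let dotStay := adv != '.' && st.contains '.'
    let q := skipRun (fun ch => ch != adv && (st.contains ch || dotStay)) rem
    match q.2 with
    | [] => none
    | ch :: rest =>
      if ch == adv || adv == '.' then
        (matchItems its rest).map (fun r => (q.1 + 1 + r.1, r.2))
      else none

-- longest(start) of Source B on the suffix text[start:]: items pass, then the tail-stars run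
def longestB (items : List (List Char × Char)) (tail : List Char) (rem : List Char) : Nat :=
  let tailDot := tail.contains '.'
  match matchItems items rem with
  | none => 0
  | some (k, rest) => k + (skipRun (fun ch => tail.contains ch || tailDot) rest).1

-- the parts/m loop of Source B; none = the 'return FAIL' path
def partsB (items : List (List Char × Char)) (tail : List Char)
    (rem : List Char) : Option (List (List Char)) :=
  match rem with
  | [] => some []
  | ch :: rest =>
    let k := longestB items tail (ch :: rest)
    if _h : k = 0 then none
    else Option.map (fun ps => (ch :: rest).take k :: ps)
           (partsB items tail ((ch :: rest).drop k))
termination_by rem.length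
decreasing_by simp; omega

-- sep.join(parts), ported by hand (exact for any list of strings)
def joinB (sep : List Char) : List (List Char) → List Char
  | [] => []
  | [p] => p
  | p :: ps => p ++ sep ++ joinB sep ps

def resplit_alt (re : String) (text : String) (sep : String) : String :=
  let p := compileB re.toList []
  match partsB p.1 p.2 text.toList with
  | none => "FAIL"
  | some ps => String.ofList (joinB sep.toList ps)

-- ===== PRECONDITION & SPEC =====
def Spec_resplit (re : String) (text : String) (sep : String) (out : String) : Prop := out = resplit_alt re text sep
instance (re : String) (text : String) (sep : String) (out : String) : Decidable (Spec_resplit re text sep out) := by unfold Spec_resplit; infer_instance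

-- ===== CLAIM (what is proved, stated in full; the proofs are below) =====
def Claim_equal_resplit : Prop := ∀ (re : String) (text : String) (sep : String), Dom_resplit re text sep → Spec_resplit re text sep (resplit re text sep)

-- ===== LEMMAS AND PROOFS =====

-- proof-side view of B's compiled items as A's state groups
def gsOf (p : List (List Char × Char) × List Char) : List (List Char × Option Char) :=
  p.1.map (fun x => (x.1, some x.2)) ++ [(p.2, none)]

-- the lookup function that state i's transition dict realises, read off i's group
def glook (g : List Char × Option Char) (i : Nat) (ch : Char) : Option Nat :=
  if g.2 = some ch then some (i + 1)
  else if g.1.contains ch then some i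
  else none

lemma getD_set_self' {α : Type} (l : List α) (n : Nat) (a d : α) (h : n < l.length) :
    (l.set n a).getD n d = a := by
  simp [List.getD_eq_getElem?_getD, h]

lemma getD_set_ne' {α : Type} (l : List α) (n m : Nat) (a d : α) (h : n ≠ m) :
    (l.set n a).getD m d = l.getD m d := by
  simp [List.getD_eq_getElem?_getD, List.getElem?_set_ne h]

lemma getD_append_left' {α : Type} (l l' : List α) (n : Nat) (d : α) (h : n < l.length) :
    (l ++ l').getD n d = l.getD n d := by
  simp [List.getD_eq_getElem?_getD, List.getElem?_append_left h]

lemma getD_append_len {α : Type} (l : List α) (x d : α) :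
    (l ++ [x]).getD l.length d = x := by
  simp [List.getD_eq_getElem?_getD]

lemma gsOf_last (p : List (List Char × Char) × List Char) :
    (gsOf p).getD ((gsOf p).length - 1) ([], none) = (p.2, none) := by
  have h := getD_append_len (p.1.map (fun x => (x.1, some x.2)))
    ((p.2, none) : List Char × Option Char) ([], none)
  simpa [gsOf] using h

lemma compile_corr : ∀ (N : Nat) (tokens : List Char), tokens.length ≤ N →
    ∀ (dfa : List (PySem.Dict Char Nat)) (state : Nat) (stars : List Char),
    dfa.length = state + 1 →
    (∀ ch, (dfa.getD state PySem.Dict.empty).get? ch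
        = if stars.contains ch then some state else none) →
    (doDfaA tokens dfa state).2 + 1 = state + (gsOf (compileB tokens stars)).length ∧
    (doDfaA tokens dfa state).1.length = state + (gsOf (compileB tokens stars)).length ∧
    (∀ j, j < state → (doDfaA tokens dfa state).1.getD j PySem.Dict.empty
        = dfa.getD j PySem.Dict.empty) ∧
    (∀ k, k < (gsOf (compileB tokens stars)).length → ∀ ch,
      ((doDfaA tokens dfa state).1.getD (state + k) PySem.Dict.empty).get? ch
        = glook ((gsOf (compileB tokens stars)).getD k ([], none)) (state + k) ch) := by
  intro N
  induction N with
  | zero =>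
    intro tokens h dfa state stars hlen hd
    have : tokens = [] := List.eq_nil_of_length_eq_zero (Nat.le_zero.mp h)
    subst this
    refine ⟨by simp [doDfaA, compileB, gsOf], by simp [doDfaA, compileB, gsOf, hlen],
      by simp [doDfaA], ?_⟩
    intro k hk ch
    simp only [compileB, gsOf, List.map_nil, List.nil_append, List.length_cons,
      List.length_nil] at hk
    interval_cases k
    simpa [doDfaA, compileB, gsOf, glook] using hd ch
  | succ n ih =>
    intro tokens h dfa state stars hlen hd
    match tokens with
    | [] =>
      refine ⟨by simp [doDfaA, compileB, gsOf], by simp [doDfaA, compileB, gsOf, hlen],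
        by simp [doDfaA], ?_⟩
      intro k hk ch
      simp only [compileB, gsOf, List.map_nil, List.nil_append, List.length_cons,
        List.length_nil] at hk
      interval_cases k
      simpa [doDfaA, compileB, gsOf, glook] using hd ch
    | c :: rest =>
      rw [doDfaA]
      have hst : state < dfa.length := by omega
      by_cases hs : rest.head? = some '*'
      · simp only [hs, if_true, addchStarA]
        have hcomp : compileB (c :: rest) stars = compileB rest.tail (stars ++ [c]) := by
          rw [compileB]; simp [hs]
        rw [hcomp]
        have IH := ih rest.tail (by simp at h ⊢; omega)
          (dfa.set state ((dfa.getD state PySem.Dict.empty).insert c state)) state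
          (stars ++ [c])
          (by simp [hlen])
          (by
            intro ch
            rw [getD_set_self' _ _ _ _ hst]
            rw [PySem.Dict.get?_insert, hd ch]
            by_cases hc : ch = c <;> by_cases hm : ch ∈ stars <;> simp [hc, hm])
        refine ⟨IH.1, IH.2.1, ?_, IH.2.2.2⟩
        intro j hj
        rw [IH.2.2.1 j hj, getD_set_ne' _ _ _ _ _ (by omega)]
      · simp only [hs, if_false, addchA]
        have hcomp : gsOf (compileB (c :: rest) stars)
            = (stars, some c) :: gsOf (compileB rest []) := by
          rw [compileB]; simp [hs, gsOf]
        rw [hcomp]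
        generalize hD : (dfa ++ [PySem.Dict.empty]).set state
            (((dfa ++ [PySem.Dict.empty]).getD state PySem.Dict.empty).insert c dfa.length)
            = dfa'
        have hD2 : (dfa ++ [PySem.Dict.empty]).getD state PySem.Dict.empty
            = dfa.getD state PySem.Dict.empty := getD_append_left' _ _ _ _ hst
        have hlen' : dfa'.length = (state + 1) + 1 := by
          rw [← hD]; simp [hlen]
        have hnew : dfa'.getD (state + 1) PySem.Dict.empty = PySem.Dict.empty := by
          rw [← hD, getD_set_ne' _ _ _ _ _ (by omega), ← hlen, getD_append_len]
        have hself : dfa'.getD state PySem.Dict.empty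
            = (dfa.getD state PySem.Dict.empty).insert c (state + 1) := by
          rw [← hD, getD_set_self' _ _ _ _ (by simp; omega), hD2, hlen]
        have IH := ih rest (by simp at h ⊢; omega) dfa' (state + 1) []
          hlen'
          (by
            intro ch
            rw [hnew]
            simp [PySem.Dict.get?_empty])
        rw [hlen]
        refine ⟨by simp only [List.length_cons]; omega, by simp only [List.length_cons]; omega,
          ?_, ?_⟩
        · intro j hj
          rw [IH.2.2.1 j (by omega), ← hD, getD_set_ne' _ _ _ _ _ (by omega),
            getD_append_left' _ _ _ _ (by omega)]
        · intro k hk ch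
          match k with
          | 0 =>
            have hz : state + 0 = state := rfl
            rw [List.getD_cons_zero, hz, IH.2.2.1 state (by omega), hself,
              PySem.Dict.get?_insert, hd ch]
            simp only [glook]
            by_cases hc : ch = c <;> by_cases hm : ch ∈ stars <;>
              simp [*] <;> try exact fun hcc => hc hcc.symm
          | k' + 1 =>
            rw [List.getD_cons_succ, show state + (k' + 1) = (state + 1) + k' by omega]
            exact IH.2.2.2 k' (by rw [List.length_cons] at hk; omega) ch

-- at the final state the simulation just counts the tail-star run
lemma sim_fin (dfa : List (PySem.Dict Char Nat)) (tail : List Char) (fin : Nat)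
    (hfin : ∀ ch, (dfa.getD fin PySem.Dict.empty).get? ch
        = if tail.contains ch then some fin else none) :
    ∀ (rem : List Char) (pos : Nat),
      simA dfa [fin] rem fin pos pos
        = pos + (skipRun (fun ch => tail.contains ch || tail.contains '.') rem).1 := by
  intro rem
  induction rem with
  | nil => intro pos; simp [simA, skipRun]
  | cons ch rest ihr =>
    intro pos
    rw [simA]
    simp only [hfin ch, hfin '.', List.mem_singleton]
    by_cases h1 : tail.contains ch
    · have h1' : ch ∈ tail := by simpa using h1
      simp only [h1, if_true, ↓reduceIte]
      rw [ihr (pos + 1)]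
      simp [skipRun, h1']
      omega
    · have h1' : ch ∉ tail := by simpa using h1
      simp only [h1, Bool.false_eq_true, if_false]
      by_cases h2 : tail.contains '.'
      · have h2' : '.' ∈ tail := by simpa using h2
        simp only [h2, if_true, ↓reduceIte]
        rw [ihr (pos + 1)]
        simp [skipRun, h1', h2']
        omega
      · have h2' : '.' ∉ tail := by simpa using h2
        simp only [h2, Bool.false_eq_true, if_false]
        simp [skipRun, h1', h2']

-- skipping one stay character shifts matchItems by one consumed char
lemma matchItems_stay (st : List Char) (adv : Char) (its : List (List Char × Char))
    (ch : Char) (rest : List Char)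
    (hpred : (ch != adv && (st.contains ch || (adv != '.' && st.contains '.'))) = true) :
    matchItems ((st, adv) :: its) (ch :: rest)
      = (matchItems ((st, adv) :: its) rest).map (fun r => (r.1 + 1, r.2)) := by
  rw [matchItems, matchItems]
  simp only [skipRun, hpred, if_true]
  rcases hq : (skipRun (fun c => c != adv && (st.contains c || (adv != '.' && st.contains '.'))) rest).2
    with _ | ⟨c2, rest2⟩
  · simp
  · by_cases hb : (c2 == adv || adv == '.') = true
    · simp only [hb, if_true]
      rcases matchItems its rest2 with _ | r <;> simp <;> omega
    · simp [hb]

-- main invariant: the DFA simulation from item-boundary state s equals the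
-- item-by-item matcher on the remaining items plus the tail run
lemma sim_items (dfa : List (PySem.Dict Char Nat)) (tail : List Char) (fin : Nat)
    (hfin : ∀ ch, (dfa.getD fin PySem.Dict.empty).get? ch
        = if tail.contains ch then some fin else none) :
    ∀ (its : List (List Char × Char)) (s : Nat), s + its.length = fin →
    (∀ j (hj : j < its.length) ch, (dfa.getD (s + j) PySem.Dict.empty).get? ch
        = if (its[j].2 = ch) then some (s + j + 1)
          else if its[j].1.contains ch then some (s + j) else none) →
    ∀ (rem : List Char) (pos b : Nat), (its = [] → b = pos) →
      simA dfa [fin] rem s pos b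
        = match matchItems its rem with
          | none => b
          | some (k, rest) =>
              pos + k + (skipRun (fun ch => tail.contains ch || tail.contains '.') rest).1 := by
  intro its
  induction its with
  | nil =>
    intro s hsfin _ rem pos b hb
    have hs : s = fin := by simpa using hsfin
    subst hs
    rw [hb rfl, sim_fin _ _ _ hfin rem pos]
    simp [matchItems]
  | cons hd tl ihits =>
    obtain ⟨st, adv⟩ := hd
    intro s hsfin hstep rem
    induction rem with
    | nil => intro pos b _; simp [simA, matchItems, skipRun]
    | cons ch rest ihr =>
      intro pos b hb
      have h0 : (dfa.getD s PySem.Dict.empty).get? ch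
          = if adv = ch then some (s + 1)
            else if st.contains ch then some s else none := by
        simpa using hstep 0 (by simp) ch
      have h0d : (dfa.getD s PySem.Dict.empty).get? '.'
          = if adv = '.' then some (s + 1)
            else if st.contains '.' then some s else none := by
        simpa using hstep 0 (by simp) '.'
      have hsfin' : (s + 1) + tl.length = fin := by simp at hsfin; omega
      have hsne : ¬ s = fin := by simp at hsfin; omega
      have hstep' : ∀ j (hj : j < tl.length) ch,
          (dfa.getD ((s + 1) + j) PySem.Dict.empty).get? ch
            = if (tl[j].2 = ch) then some ((s + 1) + j + 1)
              else if tl[j].1.contains ch then some ((s + 1) + j) else none := by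
        intro j hj ch
        have h := hstep (j + 1) (by simp; omega) ch
        rw [show s + (j + 1) = (s + 1) + j by omega] at h
        simpa using h
      have hbnext : tl = [] → (if s + 1 = fin then pos + 1 else b) = pos + 1 := by
        intro ht
        have hf : s + 1 = fin := by subst ht; simpa using hsfin'
        simp [hf]
      have IHnext := ihits (s + 1) hsfin' hstep' rest (pos + 1)
        (if s + 1 = fin then pos + 1 else b) hbnext
      have IHrest := ihr (pos + 1) b (by intro h; cases h)
      by_cases hadv : adv = ch
      · -- the advancing char of this item: move to the next item
        rw [simA]
        simp only [h0, hadv, List.mem_singleton, ↓reduceIte]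
        rw [IHnext]
        rcases hm : matchItems tl rest with _ | ⟨k, r⟩
        · have htlne : tl ≠ [] := by intro ht; subst ht; simp [matchItems] at hm
          have hne1 : ¬ s + 1 = fin := by
            rcases tl with _ | ⟨x, xs⟩
            · exact absurd rfl htlne
            · simp at hsfin'; omega
          simp [matchItems, skipRun, hadv, hm, hne1]
        · simp [matchItems, skipRun, hadv, hm]
          omega
      · by_cases hpred :
          (ch != adv && (st.contains ch || (adv != '.' && st.contains '.'))) = true
        · -- a stay character: consumed inside the current item
          have hsplit : ch ≠ adv ∧ (ch ∈ st ∨ (adv ≠ '.' ∧ '.' ∈ st)) := by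
            simpa using hpred
          rw [simA]
          by_cases hcont : ch ∈ st
          · have hcontb : st.contains ch = true := by simpa using hcont
            simp only [h0, hadv, hcontb, hsne, List.mem_singleton, ↓reduceIte]
            rw [IHrest, matchItems_stay st adv tl ch rest hpred]
            rcases hm : matchItems ((st, adv) :: tl) rest with _ | ⟨k, r⟩
            · simp [hm]
            · simp [hm]; omega
          · have hds : adv ≠ '.' ∧ '.' ∈ st := by
              rcases hsplit.2 with h | h
              · exact absurd h hcont
              · exact h
            have hcontb : st.contains ch = false := by simpa using hcont
            have hdsb : st.contains '.' = true := by simpa using hds.2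
            simp only [h0, h0d, hadv, hcontb, hdsb, hds.1, hsne, List.mem_singleton,
              Bool.false_eq_true, ↓reduceIte]
            rw [IHrest, matchItems_stay st adv tl ch rest hpred]
            rcases hm : matchItems ((st, adv) :: tl) rest with _ | ⟨k, r⟩
            · simp [hm]
            · simp [hm]; omega
        · have hadv2 : ¬ ch = adv := fun h => hadv h.symm
          have hcontb : st.contains ch = false := by
            cases hcb : st.contains ch
            · rfl
            · exfalso
              apply hpred
              rw [hcb]
              simp [bne_iff_ne]
              exact hadv2
          by_cases hdot : adv = '.'
          · -- the wildcard advances past a char matched by nothing else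
            have hadv' : ¬ '.' = ch := hdot ▸ hadv
            have hcont' : ch ∉ st := by simpa using hcontb
            rw [simA]
            simp only [h0, h0d, hadv, hadv', hdot, hcontb, Bool.false_eq_true,
              List.mem_singleton, ↓reduceIte]
            rw [IHnext]
            rcases hm : matchItems tl rest with _ | ⟨k, r⟩
            · have htlne : tl ≠ [] := by intro ht; subst ht; simp [matchItems] at hm
              have hne1 : ¬ s + 1 = fin := by
                rcases tl with _ | ⟨x, xs⟩
                · exact absurd rfl htlne
                · simp at hsfin'; omega
              simp [matchItems, skipRun, hdot, hcont', hadv2, hm, hne1]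
            · simp [matchItems, skipRun, hdot, hcont', hadv2, hm]
              omega
          · -- dead: the simulation stops and keeps the best so far
            have hdsb : st.contains '.' = false := by
              cases hcb : st.contains '.'
              · rfl
              · exfalso
                apply hpred
                have hmem : '.' ∈ st := by simpa using hcb
                simp [bne_iff_ne, hadv2, hdot, hmem]
            have hcont' : ch ∉ st := by simpa using hcontb
            have hds' : '.' ∉ st := by simpa using hdsb
            rw [simA]
            simp only [h0, h0d, hadv, hdot, hcontb, hdsb, Bool.false_eq_true, ↓reduceIte]
            simp [matchItems, skipRun, hcont', hds', hadv2, hdot]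

lemma join_flat (sep : List Char) : ∀ (p : List Char) (ps : List (List Char)),
    joinB sep (p :: ps) = p ++ ps.flatMap (fun q => sep ++ q) := by
  intro p ps
  induction ps generalizing p with
  | nil => simp [joinB]
  | cons q ps ih => simp [joinB, ih]

lemma loop_eq (dfa : List (PySem.Dict Char Nat)) (items : List (List Char × Char))
    (tail : List Char) (fin : Nat) (sep : List Char)
    (hsim : ∀ rem, simA dfa [fin] rem 0 0 0 = longestB items tail rem) :
    ∀ (N : Nat) (rem : List Char), rem.length ≤ N → ∀ acc,
      (resLoopA dfa [fin] sep rem true acc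
        = match partsB items tail rem with
          | none => "FAIL".toList
          | some ps => acc ++ ps.flatMap (fun q => sep ++ q)) ∧
      (resLoopA dfa [fin] sep rem false acc
        = match partsB items tail rem with
          | none => "FAIL".toList
          | some ps => acc ++ joinB sep ps) := by
  intro N
  induction N with
  | zero =>
    intro rem h acc
    have : rem = [] := List.eq_nil_of_length_eq_zero (Nat.le_zero.mp h)
    subst this
    constructor <;> simp [resLoopA, partsB, joinB]
  | succ n ihN =>
    intro rem h acc
    match rem with
    | [] => constructor <;> simp [resLoopA, partsB, joinB]
    | ch :: rest =>
      by_cases h0 : longestB items tail (ch :: rest) = 0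
      · constructor <;>
          (rw [resLoopA, partsB, hsim (ch :: rest)]; rw [dif_pos h0, dif_pos h0])
      · have hlen : ((ch :: rest).drop (longestB items tail (ch :: rest))).length ≤ n := by
          rw [List.length_drop, List.length_cons]
          rw [List.length_cons] at h
          omega
        constructor
        · rw [resLoopA, partsB, hsim (ch :: rest), dif_neg h0, dif_neg h0]
          have IH := (ihN _ hlen
            (acc ++ (if true = true then sep else [])
              ++ (ch :: rest).take (longestB items tail (ch :: rest)))).1
          rw [IH]
          rcases hp : partsB items tail ((ch :: rest).drop (longestB items tail (ch :: rest)))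
            with _ | ps
          · rfl
          · simp [List.flatMap_cons, List.append_assoc]
        · rw [resLoopA, partsB, hsim (ch :: rest), dif_neg h0, dif_neg h0]
          have IH := (ihN _ hlen
            (acc ++ (if false = true then sep else [])
              ++ (ch :: rest).take (longestB items tail (ch :: rest)))).1
          rw [IH]
          rcases hp : partsB items tail ((ch :: rest).drop (longestB items tail (ch :: rest)))
            with _ | ps
          · rfl
          · simp [join_flat, List.append_assoc]

-- ===== VERDICT (by name: the statement is the Claim_ definition above) =====
theorem resplit_spec : Claim_equal_resplit := by
  unfold Claim_equal_resplit
  intro re text sep _hdom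
  unfold Spec_resplit
  obtain ⟨ha, hb, hc, hd⟩ := compile_corr re.toList.length re.toList le_rfl
    [PySem.Dict.empty] 0 []
    (by simp)
    (by intro ch; simp [PySem.Dict.get?_empty])
  set p := compileB re.toList [] with hp
  set D := (doDfaA re.toList [PySem.Dict.empty] 0).1 with hDdef
  set fin := (doDfaA re.toList [PySem.Dict.empty] 0).2 with hfindef
  have hfinlen : fin + 1 = (gsOf p).length := by simpa using ha
  have hcorr : ∀ k, k < (gsOf p).length → ∀ ch,
      (D.getD k PySem.Dict.empty).get? ch = glook ((gsOf p).getD k ([], none)) k ch := by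
    intro k hk ch
    simpa using hd k hk ch
  have hlenitems : fin = p.1.length := by
    have : (gsOf p).length = p.1.length + 1 := by simp [gsOf]
    omega
  have hfin : ∀ ch, (D.getD fin PySem.Dict.empty).get? ch
      = if p.2.contains ch then some fin else none := by
    intro ch
    have := hcorr fin (by omega) ch
    have hlast : (gsOf p).getD fin ([], none) = (p.2, none) := by
      have := gsOf_last p
      rwa [show (gsOf p).length - 1 = fin by omega] at this
    rw [this, hlast]
    simp [glook]
  have hstep : ∀ j (hj : j < p.1.length) ch, (D.getD (0 + j) PySem.Dict.empty).get? ch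
      = if (p.1[j].2 = ch) then some (0 + j + 1)
        else if p.1[j].1.contains ch then some (0 + j) else none := by
    intro j hj ch
    have hco := hcorr j (by simp [gsOf]; omega) ch
    have hg : (gsOf p).getD j ([], none) = (p.1[j].1, some p.1[j].2) := by
      simp [gsOf, List.getD_eq_getElem?_getD, List.getElem?_append_left
        (by simpa using hj : j < (p.1.map (fun x => (x.1, some x.2))).length), hj]
    simp only [Nat.zero_add]
    rw [hco, hg]
    simp [glook]
  have hsim : ∀ rem, simA D [fin] rem 0 0 0 = longestB p.1 p.2 rem := by
    intro rem
    have := sim_items D p.2 fin hfin p.1 0 (by omega) hstep rem 0 0 (fun _ => rfl)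
    rw [this]
    simp only [longestB]
    rcases matchItems p.1 rem with _ | ⟨k, r⟩
    · rfl
    · simp
  have hloop := (loop_eq D p.1 p.2 fin sep.toList hsim text.toList.length text.toList
    le_rfl []).2
  show String.ofList (resLoopA D [fin] sep.toList text.toList false [])
    = match partsB p.1 p.2 text.toList with
      | none => "FAIL"
      | some ps => String.ofList (joinB sep.toList ps)
  rw [hloop]
  rcases hpp : partsB p.1 p.2 text.toList with _ | ps
  · rfl
  · simp
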